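-- pv_equiv track=rewrite | github.com/SysAdminDoc/FileOrganizer | fileorganizer/catalog.py | infer_category_from_name
-- ===== SOURCE A (Python) =====
-- _ASSET_TYPE_CATEGORIES = {
--     'AEP': 'After Effects Templates',
--     'Premiere': 'Premiere Pro Templates',
--     'PSD': 'Photoshop Templates',
--     'Illustrator': 'Illustrator Templates',
--     'InDesign': 'InDesign Templates',
--     'Motion Graphics': 'Motion Graphics Templates',
--     'Audio': 'Audio',
--     'Video': 'Stock Video',
--     'Font': 'Fonts',
--     'LUT': 'LUTs & Color Grading',
--     'XD': 'UI Kits',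
--     'Figma': 'UI Kits',
-- }
--
-- def infer_category_from_name(name: str, asset_type: str) -> str:
--     """Quick local category suggestion before hitting the AI."""
--     base = _ASSET_TYPE_CATEGORIES.get(asset_type, 'Design Assets')
--     # Subcategory hints from name
--     norm = name.lower()
--     if any(x in norm for x in ['transition', 'wipe', 'slide']):
--         return f"{base}/Transitions"
--     if any(x in norm for x in ['intro', 'opener', 'opening']):
--         return f"{base}/Intros & Openers"
--     if any(x in norm for x in ['logo', 'reveal', 'sting']):
--         return f"{base}/Logo Reveals"
--     if any(x in norm for x in ['title', 'text', 'typography', 'typeface']):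
--         return f"{base}/Titles & Typography"
--     if any(x in norm for x in ['lower third', 'lowerthird', 'lower_third']):
--         return f"{base}/Lower Thirds"
--     if any(x in norm for x in ['wedding', 'bride', 'marriage']):
--         return f"{base}/Wedding"
--     if any(x in norm for x in ['corporate', 'business', 'company', 'office']):
--         return f"{base}/Corporate"
--     if any(x in norm for x in ['social', 'instagram', 'facebook', 'tiktok', 'youtube']):
--         return f"{base}/Social Media"
--     if any(x in norm for x in ['promo', 'promotion', 'advertisement', 'commercial']):
--         return f"{base}/Promotional"
--     if any(x in norm for x in ['slideshow', 'slide show', 'photo slide']):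
--         return f"{base}/Slideshows"
--     if any(x in norm for x in ['particle', 'smoke', 'fire', 'explosion']):
--         return f"{base}/Visual Effects"
--     if any(x in norm for x in ['countdown', 'count down', 'timer']):
--         return f"{base}/Countdowns"
--     if any(x in norm for x in ['overlay', 'frame', 'border']):
--         return f"{base}/Overlays & Frames"
--     if any(x in norm for x in ['mockup', 'mock-up', 'mock up']):
--         return f"{base}/Mockups"
--     if any(x in norm for x in ['flyer', 'poster', 'banner']):
--         return f"{base}/Print Templates"
--     if any(x in norm for x in ['icon', 'icons', 'pictogram']):
--         return f"{base}/Icons"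
--     if any(x in norm for x in ['pattern', 'texture', 'background']):
--         return f"{base}/Backgrounds & Textures"
--     return base
-- ===== SOURCE B (Python) =====
-- _ASSET_TYPE_CATEGORIES = {
--     'AEP': 'After Effects Templates',
--     'Premiere': 'Premiere Pro Templates',
--     'PSD': 'Photoshop Templates',
--     'Illustrator': 'Illustrator Templates',
--     'InDesign': 'InDesign Templates',
--     'Motion Graphics': 'Motion Graphics Templates',
--     'Audio': 'Audio',
--     'Video': 'Stock Video',
--     'Font': 'Fonts',
--     'LUT': 'LUTs & Color Grading',
--     'XD': 'UI Kits',
--     'Figma': 'UI Kits',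
-- }
--
-- # Subcategory names indexed by priority rank (0 = highest priority).
-- _SUFFIX_BY_RANK = [
--     'Transitions', 'Intros & Openers', 'Logo Reveals', 'Titles & Typography',
--     'Lower Thirds', 'Wedding', 'Corporate', 'Social Media', 'Promotional',
--     'Slideshows', 'Visual Effects', 'Countdowns', 'Overlays & Frames',
--     'Mockups', 'Print Templates', 'Icons', 'Backgrounds & Textures',
-- ]
--
-- # Flat inverted index: keyword -> priority rank of its subcategory.
-- _KEYWORD_RANK = {
--     'transition': 0, 'wipe': 0, 'slide': 0,
--     'intro': 1, 'opener': 1, 'opening': 1,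
--     'logo': 2, 'reveal': 2, 'sting': 2,
--     'title': 3, 'text': 3, 'typography': 3, 'typeface': 3,
--     'lower third': 4, 'lowerthird': 4, 'lower_third': 4,
--     'wedding': 5, 'bride': 5, 'marriage': 5,
--     'corporate': 6, 'business': 6, 'company': 6, 'office': 6,
--     'social': 7, 'instagram': 7, 'facebook': 7, 'tiktok': 7, 'youtube': 7,
--     'promo': 8, 'promotion': 8, 'advertisement': 8, 'commercial': 8,
--     'slideshow': 9, 'slide show': 9, 'photo slide': 9,
--     'particle': 10, 'smoke': 10, 'fire': 10, 'explosion': 10,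
--     'countdown': 11, 'count down': 11, 'timer': 11,
--     'overlay': 12, 'frame': 12, 'border': 12,
--     'mockup': 13, 'mock-up': 13, 'mock up': 13,
--     'flyer': 14, 'poster': 14, 'banner': 14,
--     'icon': 15, 'icons': 15, 'pictogram': 15,
--     'pattern': 16, 'texture': 16, 'background': 16,
-- }
--
-- def infer_category_from_name(name: str, asset_type: str) -> str:
--     """Collect every keyword hit in the name and keep the best-ranked one."""
--     base = _ASSET_TYPE_CATEGORIES.get(asset_type, 'Design Assets')
--     norm = name.lower()
--     best = min((rank for kw, rank in _KEYWORD_RANK.items() if kw in norm),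
--                default=None)
--     if best is None:
--         return base
--     return f"{base}/{_SUFFIX_BY_RANK[best]}"
-- ===== Notes on version B (the rewrite author's own statement) =====
-- stated objective: alternative
-- what changed: A's ordered first-match if-chain is replaced by a flat inverted keyword->rank index: B collects ALL keyword hits in the name at once and returns the subcategory of the minimum (best-priority) rank, so no early-exit branch chain remains.
import Mathlib
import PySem

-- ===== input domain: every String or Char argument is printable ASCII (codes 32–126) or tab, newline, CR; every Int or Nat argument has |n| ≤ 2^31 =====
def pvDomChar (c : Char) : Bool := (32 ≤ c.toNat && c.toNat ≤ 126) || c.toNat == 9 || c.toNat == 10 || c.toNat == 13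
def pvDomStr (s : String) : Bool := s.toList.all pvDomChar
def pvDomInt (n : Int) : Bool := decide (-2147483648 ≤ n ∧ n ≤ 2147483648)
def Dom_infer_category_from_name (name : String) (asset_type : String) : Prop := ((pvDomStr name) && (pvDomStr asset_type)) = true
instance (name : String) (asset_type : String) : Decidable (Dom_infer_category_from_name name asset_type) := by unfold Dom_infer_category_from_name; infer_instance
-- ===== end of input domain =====

-- B replaces A's ordered first-match if-chain by a flat inverted keyword→rank index:
-- it collects ALL keyword hits in the name and keeps the minimum (best-priority) rank;
-- objective: simpler (same cost).

-- ===== PORT A =====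
-- the module-level dict _ASSET_TYPE_CATEGORIES (insertion-order association list)
def pvAssetTypeCategories : PySem.Dict String String :=
  PySem.Dict.ofList [("AEP", "After Effects Templates"),
   ("Premiere", "Premiere Pro Templates"),
   ("PSD", "Photoshop Templates"),
   ("Illustrator", "Illustrator Templates"),
   ("InDesign", "InDesign Templates"),
   ("Motion Graphics", "Motion Graphics Templates"),
   ("Audio", "Audio"),
   ("Video", "Stock Video"),
   ("Font", "Fonts"),
   ("LUT", "LUTs & Color Grading"),
   ("XD", "UI Kits"),
   ("Figma", "UI Kits")]

def infer_category_from_name (name : String) (asset_type : String) : String :=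
  let base := PySem.Dict.getD pvAssetTypeCategories asset_type "Design Assets"
  let norm := PySem.Str.lower name
  if ["transition", "wipe", "slide"].any (fun x => PySem.Str.isIn x norm) then base ++ "/Transitions"
  else if ["intro", "opener", "opening"].any (fun x => PySem.Str.isIn x norm) then base ++ "/Intros & Openers"
  else if ["logo", "reveal", "sting"].any (fun x => PySem.Str.isIn x norm) then base ++ "/Logo Reveals"
  else if ["title", "text", "typography", "typeface"].any (fun x => PySem.Str.isIn x norm) then base ++ "/Titles & Typography"
  else if ["lower third", "lowerthird", "lower_third"].any (fun x => PySem.Str.isIn x norm) then base ++ "/Lower Thirds"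
  else if ["wedding", "bride", "marriage"].any (fun x => PySem.Str.isIn x norm) then base ++ "/Wedding"
  else if ["corporate", "business", "company", "office"].any (fun x => PySem.Str.isIn x norm) then base ++ "/Corporate"
  else if ["social", "instagram", "facebook", "tiktok", "youtube"].any (fun x => PySem.Str.isIn x norm) then base ++ "/Social Media"
  else if ["promo", "promotion", "advertisement", "commercial"].any (fun x => PySem.Str.isIn x norm) then base ++ "/Promotional"
  else if ["slideshow", "slide show", "photo slide"].any (fun x => PySem.Str.isIn x norm) then base ++ "/Slideshows"
  else if ["particle", "smoke", "fire", "explosion"].any (fun x => PySem.Str.isIn x norm) then base ++ "/Visual Effects"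
  else if ["countdown", "count down", "timer"].any (fun x => PySem.Str.isIn x norm) then base ++ "/Countdowns"
  else if ["overlay", "frame", "border"].any (fun x => PySem.Str.isIn x norm) then base ++ "/Overlays & Frames"
  else if ["mockup", "mock-up", "mock up"].any (fun x => PySem.Str.isIn x norm) then base ++ "/Mockups"
  else if ["flyer", "poster", "banner"].any (fun x => PySem.Str.isIn x norm) then base ++ "/Print Templates"
  else if ["icon", "icons", "pictogram"].any (fun x => PySem.Str.isIn x norm) then base ++ "/Icons"
  else if ["pattern", "texture", "background"].any (fun x => PySem.Str.isIn x norm) then base ++ "/Backgrounds & Textures"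
  else base

-- ===== PORT B =====
-- _SUFFIX_BY_RANK: subcategory names indexed by priority rank
def pvSuffixByRank : List String :=
  ["Transitions", "Intros & Openers", "Logo Reveals", "Titles & Typography",
   "Lower Thirds", "Wedding", "Corporate", "Social Media", "Promotional",
   "Slideshows", "Visual Effects", "Countdowns", "Overlays & Frames",
   "Mockups", "Print Templates", "Icons", "Backgrounds & Textures"]

-- _KEYWORD_RANK: flat inverted index keyword -> rank (dict as insertion-order list)
def pvKeywordRank : List (String × Nat) :=
  [("transition", 0), ("wipe", 0), ("slide", 0),
   ("intro", 1), ("opener", 1), ("opening", 1),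
   ("logo", 2), ("reveal", 2), ("sting", 2),
   ("title", 3), ("text", 3), ("typography", 3), ("typeface", 3),
   ("lower third", 4), ("lowerthird", 4), ("lower_third", 4),
   ("wedding", 5), ("bride", 5), ("marriage", 5),
   ("corporate", 6), ("business", 6), ("company", 6), ("office", 6),
   ("social", 7), ("instagram", 7), ("facebook", 7), ("tiktok", 7), ("youtube", 7),
   ("promo", 8), ("promotion", 8), ("advertisement", 8), ("commercial", 8),
   ("slideshow", 9), ("slide show", 9), ("photo slide", 9),
   ("particle", 10), ("smoke", 10), ("fire", 10), ("explosion", 10),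
   ("countdown", 11), ("count down", 11), ("timer", 11),
   ("overlay", 12), ("frame", 12), ("border", 12),
   ("mockup", 13), ("mock-up", 13), ("mock up", 13),
   ("flyer", 14), ("poster", 14), ("banner", 14),
   ("icon", 15), ("icons", 15), ("pictogram", 15),
   ("pattern", 16), ("texture", 16), ("background", 16)]

-- the generator '(rank for kw, rank in _KEYWORD_RANK.items() if kw in norm)'
def pvHits (norm : String) (idx : List (String × Nat)) : List Nat :=
  idx.filterMap (fun p => if PySem.Str.isIn p.1 norm then some p.2 else none)

def infer_category_from_name_alt (name : String) (asset_type : String) : String :=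
  let base := PySem.Dict.getD pvAssetTypeCategories asset_type "Design Assets"
  let norm := PySem.Str.lower name
  -- best = min(hits, default=None)
  match (pvHits norm pvKeywordRank).min? with
  | none => base
  | some best => base ++ "/" ++ pvSuffixByRank.getD best ""

-- ===== PRECONDITION & SPEC =====
def Spec_infer_category_from_name (name : String) (asset_type : String) (out : String) : Prop := out = infer_category_from_name_alt name asset_type
instance (name : String) (asset_type : String) (out : String) : Decidable (Spec_infer_category_from_name name asset_type out) := by unfold Spec_infer_category_from_name; infer_instance

-- ===== CLAIM (what is proved, stated in full; the proofs are below) =====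
def Claim_equal_infer_category_from_name : Prop := ∀ (name : String) (asset_type : String), Dom_infer_category_from_name name asset_type → Spec_infer_category_from_name name asset_type (infer_category_from_name name asset_type)

-- ===== LEMMAS AND PROOFS =====

-- A's keyword groups, in branch order (rank i = i-th group)
def pvGroups : List (List String) :=
  [["transition", "wipe", "slide"],
   ["intro", "opener", "opening"],
   ["logo", "reveal", "sting"],
   ["title", "text", "typography", "typeface"],
   ["lower third", "lowerthird", "lower_third"],
   ["wedding", "bride", "marriage"],
   ["corporate", "business", "company", "office"],
   ["social", "instagram", "facebook", "tiktok", "youtube"],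
   ["promo", "promotion", "advertisement", "commercial"],
   ["slideshow", "slide show", "photo slide"],
   ["particle", "smoke", "fire", "explosion"],
   ["countdown", "count down", "timer"],
   ["overlay", "frame", "border"],
   ["mockup", "mock-up", "mock up"],
   ["flyer", "poster", "banner"],
   ["icon", "icons", "pictogram"],
   ["pattern", "texture", "background"]]

-- annotate each keyword of group i (counting from n) with its rank
def pvFlatRanks (groups : List (List String)) (n : Nat) : List (String × Nat) :=
  match groups with
  | [] => []
  | g :: gs => g.map (fun k => (k, n)) ++ pvFlatRanks gs (n + 1)

-- index (from n) of the first group with a keyword occurring in norm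
def pvFirstIdx (groups : List (List String)) (norm : String) (n : Nat) : Option Nat :=
  match groups with
  | [] => none
  | g :: gs => if g.any (fun x => PySem.Str.isIn x norm) then some n
               else pvFirstIdx gs norm (n + 1)

theorem pvKeywordRank_eq_flat : pvKeywordRank = pvFlatRanks pvGroups 0 := by decide

theorem pvHits_append (norm : String) (a b : List (String × Nat)) :
    pvHits norm (a ++ b) = pvHits norm a ++ pvHits norm b := by
  simp [pvHits]

theorem pvHits_map_const (norm : String) (g : List String) (n : Nat) :
    pvHits norm (g.map (fun k => (k, n))) =
      List.replicate (g.filter (fun k => PySem.Str.isIn k norm)).length n := by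
  induction g with
  | nil => rfl
  | cons k ks ih =>
    simp only [List.map_cons, pvHits, PySem.Str.isIn, List.filterMap_cons, List.filter_cons] at *
    by_cases h : PySem.Chars.isIn k.toList norm.toList <;> simp [h, ih, List.replicate_succ]

theorem pvHits_flat_lb (norm : String) :
    ∀ (groups : List (List String)) (n : Nat) (x : Nat),
      x ∈ pvHits norm (pvFlatRanks groups n) → n ≤ x := by
  intro groups
  induction groups with
  | nil => intro n x h; simp [pvFlatRanks, pvHits] at h
  | cons g gs ih =>
    intro n x h
    rw [pvFlatRanks, pvHits_append, pvHits_map_const, List.mem_append] at h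
    rcases h with h | h
    · exact Nat.le_of_eq (List.eq_of_mem_replicate h).symm
    · exact Nat.le_of_succ_le (ih (n + 1) x h)

theorem pvMin_flat (norm : String) :
    ∀ (groups : List (List String)) (n : Nat),
      (pvHits norm (pvFlatRanks groups n)).min? = pvFirstIdx groups norm n := by
  intro groups
  induction groups with
  | nil => intro n; rfl
  | cons g gs ih =>
    intro n
    rw [pvFlatRanks, pvHits_append, pvHits_map_const, pvFirstIdx]
    by_cases h : g.any (fun x => PySem.Str.isIn x norm)
    · rw [if_pos h]
      rcases List.any_eq_true.1 h with ⟨k, hk, hkin⟩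
      have hlen : (g.filter (fun k => PySem.Str.isIn k norm)).length ≠ 0 := by
        intro h0
        rw [List.length_eq_zero_iff] at h0
        exact absurd hkin (by simpa using List.filter_eq_nil_iff.1 h0 k hk)
      apply List.min?_eq_some_iff.2
      constructor
      · exact List.mem_append_left _ (List.mem_replicate.2 ⟨hlen, rfl⟩)
      · intro b hb
        rcases List.mem_append.1 hb with hb | hb
        · exact Nat.le_of_eq (List.eq_of_mem_replicate hb).symm
        · exact Nat.le_of_succ_le (pvHits_flat_lb norm gs (n + 1) b hb)
    · have h0 : (g.filter (fun k => PySem.Str.isIn k norm)).length = 0 := by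
        rw [List.length_eq_zero_iff, List.filter_eq_nil_iff]
        intro k hk hkin
        exact h (List.any_eq_true.2 ⟨k, hk, hkin⟩)
      rw [if_neg h, h0, List.replicate_zero, List.nil_append]
      exact ih (n + 1)

-- push the final match of B through the ite chain produced by unfolding pvFirstIdx
def pvJoin (base : String) : Option Nat → String
  | none => base
  | some best => base ++ "/" ++ pvSuffixByRank.getD best ""

theorem pvJoin_ite (b : String) (c : Prop) [Decidable c] (x : Nat) (r : Option Nat) :
    pvJoin b (if c then some x else r) = if c then pvJoin b (some x) else pvJoin b r := by
  split_ifs <;> rfl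

theorem alt_eq_firstIdx (name asset_type : String) :
    infer_category_from_name_alt name asset_type =
      pvJoin (PySem.Dict.getD pvAssetTypeCategories asset_type "Design Assets")
        (pvFirstIdx pvGroups (PySem.Str.lower name) 0) := by
  unfold infer_category_from_name_alt pvJoin
  simp only [pvKeywordRank_eq_flat, pvMin_flat]

-- ===== VERDICT (by name: the statement is the Claim_ definition above) =====
set_option maxHeartbeats 2000000 in
set_option maxRecDepth 4096 in
theorem infer_category_from_name_spec : Claim_equal_infer_category_from_name := by
  intro name asset_type _
  unfold Spec_infer_category_from_name
  rw [alt_eq_firstIdx]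
  simp only [infer_category_from_name, pvGroups, pvFirstIdx]
  simp only [pvJoin_ite]
  simp only [pvJoin, String.append_assoc]
  rfl
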